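-- pv_equiv track=rewrite | github.com/olga3n/adventofcode | 2024/day_19_linen_layout_2.py | parse_data
-- ===== SOURCE A (Python) =====
-- from typing import Iterable
--
-- def parse_data(lines: Iterable[str]) -> tuple[set[str], list[str]]:
--     patterns = []
--     designs = []
--
--     flag = False
--
--     for line in lines:
--         if len(line) == 0:
--             flag = True
--         elif not flag:
--             patterns.extend(line.split(', '))
--         else:
--             designs.append(line)
--
--     return set(patterns), designs
-- ===== SOURCE B (Python) =====
-- def parse_data(lines):
--     lines = list(lines)
--     sep = lines.index('') if '' in lines else len(lines)
--     patterns = [p for line in lines[:sep] for p in line.split(', ')]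
--     designs = [line for line in lines[sep + 1:] if line]
--     return set(patterns), designs
-- ===== Notes on version B (the rewrite author's own statement) =====
-- stated objective: simpler
-- what changed: Replaces the stateful flag loop with a 'find the first blank line once, then two shaped slice comprehensions' decomposition (patterns flattened from the prefix, designs filtered from the suffix).
import Mathlib
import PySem

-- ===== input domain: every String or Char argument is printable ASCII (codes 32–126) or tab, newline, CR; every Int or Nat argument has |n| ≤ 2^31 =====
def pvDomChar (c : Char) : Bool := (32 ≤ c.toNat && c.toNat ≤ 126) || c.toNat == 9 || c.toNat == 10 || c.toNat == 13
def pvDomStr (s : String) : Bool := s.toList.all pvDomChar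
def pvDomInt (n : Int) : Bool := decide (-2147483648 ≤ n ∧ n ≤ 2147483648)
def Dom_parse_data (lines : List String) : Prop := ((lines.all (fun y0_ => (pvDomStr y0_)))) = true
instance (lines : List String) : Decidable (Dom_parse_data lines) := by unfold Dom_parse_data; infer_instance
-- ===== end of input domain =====

-- B replaces A's stateful flag loop by locating the first blank line once and taking two
-- shaped slice passes (flatten-split the prefix, filter the suffix); objective: simpler.

-- exact port of Python's line.split(', ') (separator nonempty) — shared by both ports
def splitCommaSpace (line : String) : List String :=
  (PySem.Chars.splitOn line.toList (", ".toList)).map String.ofList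

-- ===== PORT A =====
-- A's for-loop over lines with state (flag, patterns, designs)
def parseLoopA (flag : Bool) (pats des : List String) : List String → List String × List String
  | [] => (pats, des)
  | line :: rest =>
    if PySem.Str.len line = 0 then parseLoopA true pats des rest
    else if flag = false then parseLoopA flag (pats ++ splitCommaSpace line) des rest
    else parseLoopA flag pats (des ++ [line]) rest

def parse_data (lines : List String) : List String × List String :=
  let r := parseLoopA false [] [] lines
  (PySem.Set.ofList r.1, r.2)

-- ===== PORT B =====
def parse_data_alt (lines : List String) : List String × List String :=
  let sep : Nat := (PySem.List.index? lines "").getD lines.length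
  let patterns := (PySem.List.slice lines none (some (sep : Int))).flatMap
      (fun line => splitCommaSpace line)
  let designs := (PySem.List.slice lines (some ((sep : Int) + 1)) none).filter
      (fun line => line ≠ "")
  (PySem.Set.ofList patterns, designs)

-- ===== PRECONDITION & SPEC =====
def Spec_parse_data (lines : List String) (out : List String × List String) : Prop := out = parse_data_alt lines
instance (lines : List String) (out : List String × List String) : Decidable (Spec_parse_data lines out) := by unfold Spec_parse_data; infer_instance

-- ===== CLAIM (what is proved, stated in full; the proofs are below) =====
def Claim_equal_parse_data : Prop := ∀ (lines : List String), Dom_parse_data lines → Spec_parse_data lines (parse_data lines)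

-- ===== LEMMAS AND PROOFS =====

theorem str_len_eq_zero_iff (s : String) : PySem.Str.len s = 0 ↔ s = "" := by
  rw [← String.toList_eq_nil_iff]
  simp [PySem.Str.len]

-- once flag is true the loop only filters nonempty lines into designs
theorem parseLoopA_true (rest : List String) : ∀ (pats des : List String),
    parseLoopA true pats des rest = (pats, des ++ rest.filter (fun l => l ≠ "")) := by
  induction rest with
  | nil => intro pats des; simp [parseLoopA]
  | cons line rest ih =>
    intro pats des
    by_cases h : line = ""
    · subst h
      simp [parseLoopA, ih, PySem.Str.len]
    · have hlen : ¬ PySem.Str.len line = 0 := by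
        simpa [str_len_eq_zero_iff] using h
      simp [parseLoopA, ih, h]

-- the flag-false phase equals B's 'split at the first blank line' decomposition
theorem parseLoopA_false (lines : List String) : ∀ (pats des : List String),
    parseLoopA false pats des lines =
      (pats ++ (lines.take (lines.findIdx (fun l => l == ""))).flatMap
          (fun line => splitCommaSpace line),
       des ++ (lines.drop (lines.findIdx (fun l => l == "") + 1)).filter (fun l => l ≠ "")) := by
  induction lines with
  | nil => intro pats des; simp [parseLoopA]
  | cons line rest ih =>
    intro pats des
    by_cases h : line = ""
    · subst h
      simp [parseLoopA, PySem.Str.len, parseLoopA_true, List.findIdx_cons]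
    · have hlen : ¬ PySem.Str.len line = 0 := by
        simpa [str_len_eq_zero_iff] using h
      have hb : (line == "") = false := by simpa using h
      simp [parseLoopA, ih, List.findIdx_cons, hb]
      intro h'
      exact absurd h' h
-- Python's 'lines.index("") if "" in lines else len(lines)' is findIdx
theorem index?_getD_eq_findIdx (lines : List String) :
    (PySem.List.index? lines "").getD lines.length = lines.findIdx (fun l => l == "") := by
  induction lines with
  | nil => rfl
  | cons line rest ih =>
    by_cases h : line = ""
    · subst h
      rw [PySem.List.index?_cons_self]
      simp [List.findIdx_cons]
    · rw [PySem.List.index?_cons_of_ne rest h, List.findIdx_cons]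
      have hb : (line == "") = false := by simpa using h
      rw [hb, ← ih]
      cases hidx : PySem.List.index? rest "" with
      | none => simp
      | some k => simp

-- ===== VERDICT (by name: the statement is the Claim_ definition above) =====
theorem parse_data_spec : Claim_equal_parse_data := by
  intro lines _
  show parse_data lines = parse_data_alt lines
  unfold parse_data parse_data_alt
  simp only [index?_getD_eq_findIdx, parseLoopA_false, List.nil_append]
  have hc : ((lines.findIdx (fun l => l == "") : Int) + 1)
      = ((lines.findIdx (fun l => l == "") + 1 : Nat) : Int) := by push_cast; ring
  rw [hc, PySem.List.slice_to_natCast, PySem.List.slice_from_natCast]
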